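-- pv_equiv track=rewrite | github.com/Lonely-Programmer/Graph_Network | partition.py | violence
-- ===== SOURCE A (Python) =====
-- from itertools import combinations
--
-- def calc_cost(G,X,Y):
--     cost = 0
--     for u in X:
--         for v in Y:
--             cost += G[u][v]
--     return cost
--
-- def violence(G,n):
--     min_cost = 9999999999
--     min_X = None
--     min_Y = None
--
--     x_list = list(combinations(range(2 * n),n))
--     for obj in x_list:
--         X = set(obj)
--         Y = set(list(range(2 * n))) - X
--         c = calc_cost(G,X,Y)
--         if c < min_cost:
--             min_cost = c
--             min_X = X
--             min_Y = Y
--     return (min_cost,min_X,min_Y)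
-- ===== SOURCE B (Python) =====
-- def violence(G, n):
--     m = 2 * n
--     rowsum = [sum(G[u][v] for v in range(m)) for u in range(m)]
--
--     def dfs(k, start, chosen, rs, s2, best):
--         # visits every k-element lexicographic extension of `chosen`;
--         # rs = sum of rowsum over chosen, s2 = sum of G[u][v] over chosen x chosen
--         if k == 0:
--             c = rs - s2
--             return (c, chosen) if c < best[0] else best
--         for w in range(start, m - k + 1):
--             d = G[w][w]
--             for v in chosen:
--                 d += G[w][v] + G[v][w]
--             best = dfs(k - 1, w + 1, chosen + [w], rs + rowsum[w], s2 + d, best)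
--         return best
--
--     best = dfs(n, 0, [], 0, 0, (9999999999, None))
--     if best[1] is None:
--         return (best[0], None, None)
--     X = set(best[1])
--     return (best[0], X, set(v for v in range(m) if v not in X))
-- ===== Notes on version B (the rewrite author's own statement) =====
-- stated objective: alternative
-- what changed: Instead of materialising all combinations and rescanning the full X-by-Y block for each one, B precomputes rowsum[u] once and generates the combinations itself by lexicographic DFS that carries the partial cost (sum of rowsums minus the X-by-X block) incrementally, O(n) extra work per extension instead of O(n^2) per combination (it trades itertools' C-coded enumeration for Python-level recursion, so the constant factor is larger on tiny inputs). …
import Mathlib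
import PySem

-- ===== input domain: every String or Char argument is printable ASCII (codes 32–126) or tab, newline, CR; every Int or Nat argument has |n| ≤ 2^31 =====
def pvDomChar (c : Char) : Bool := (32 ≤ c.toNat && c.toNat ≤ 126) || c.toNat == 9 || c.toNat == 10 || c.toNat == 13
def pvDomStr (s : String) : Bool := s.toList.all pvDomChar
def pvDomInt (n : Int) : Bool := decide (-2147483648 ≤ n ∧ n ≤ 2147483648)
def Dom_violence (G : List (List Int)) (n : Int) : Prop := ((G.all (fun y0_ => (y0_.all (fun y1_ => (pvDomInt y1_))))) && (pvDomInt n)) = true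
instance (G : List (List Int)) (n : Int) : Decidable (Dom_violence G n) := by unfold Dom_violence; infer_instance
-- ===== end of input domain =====

-- B replaces the materialise-all-combinations + full X×Y rescan of A by a precomputed rowsum
-- table and a lexicographic DFS that carries the partial cost incrementally (alternative algorithm).


-- ===== PORT A =====
-- G[u][v]; A raises IndexError out of range, those inputs are excluded by Pre_ (default 0 there)
def gget (G : List (List Int)) (u v : Int) : Int :=
  PySem.List.pyGetD (PySem.List.pyGetD G u []) v 0

def calc_cost (G : List (List Int)) (X Y : List Int) : Int :=
  X.foldl (fun cost u => Y.foldl (fun cost v => cost + gget G u v) cost) 0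

-- literal port of A; min_X/min_Y start as None (Option); the final None is ported as []
-- (Pre_ excludes the inputs on which A's min_X stays None); n.toNat: A raises on n < 0 (outside Pre_)
def violence (G : List (List Int)) (n : Int) : Int × List Int × List Int :=
  let x_list := PySem.List.combinations (PySem.List.pyRange 0 (2 * n) 1) n.toNat
  let r := x_list.foldl
    (fun (st : Int × Option (List Int) × Option (List Int)) obj =>
      let X : PySem.Set Int := PySem.Set.ofList obj
      let Y : PySem.Set Int := PySem.Set.diff (PySem.Set.ofList (PySem.List.pyRange 0 (2 * n) 1)) X
      let c := calc_cost G X Y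
      if c < st.1 then (c, some X, some Y) else st)
    (9999999999, none, none)
  (r.1, (r.2.1).getD [], (r.2.2).getD [])

-- ===== PORT B =====
-- lexicographic DFS of Source B; k counts down to 0, ported as a Nat (= n on every input with 0 ≤ n;
-- for n < 0 Source B returns the untouched sentinel, outside Pre_)
def dfsB (G : List (List Int)) (rowsum : List Int) (m : Int) :
    Nat → Int → List Int → Int → Int → Int × Option (List Int) → Int × Option (List Int)
  | 0, _, chosen, rs, s2, best =>
      let c := rs - s2
      if c < best.1 then (c, some chosen) else best
  | Nat.succ k, start, chosen, rs, s2, best =>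
      (PySem.List.pyRange start (m - (k + 1) + 1) 1).foldl
        (fun best w =>
          let d := chosen.foldl (fun d v => d + gget G w v + gget G v w) (gget G w w)
          dfsB G rowsum m k (w + 1) (chosen ++ [w])
            (rs + PySem.List.pyGetD rowsum w 0) (s2 + d) best)
        best

def violence_alt (G : List (List Int)) (n : Int) : Int × List Int × List Int :=
  let m := 2 * n
  let rng := PySem.List.pyRange 0 m 1
  let rowsum := rng.map (fun u => rng.foldl (fun s v => s + gget G u v) 0)
  let best := dfsB G rowsum m n.toNat 0 [] 0 0 (9999999999, none)
  match best.2 with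
  | none => (best.1, [], [])
  | some xs =>
      let X : PySem.Set Int := PySem.Set.ofList xs
      (best.1, X, PySem.Set.ofList (rng.filter (fun v => !(PySem.Set.contains X v))))

-- ===== PRECONDITION & SPEC =====
-- Pre_ excludes: n < 0 (A raises ValueError), G too small for the 2n×2n index pattern (A raises
-- IndexError), and inputs whose total absolute weight reaches the sentinel 9999999999, on which
-- A can return (9999999999, None, None) — None is not a value of the declared List Int type.
def Pre_violence (G : List (List Int)) (n : Int) : Prop :=
  0 ≤ n ∧ 2 * n ≤ (G.length : Int) ∧
  (∀ row ∈ G.take (2 * n).toNat, 2 * n ≤ (row.length : Int)) ∧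
  (((G.take (2 * n).toNat).map (fun row => ((row.take (2 * n).toNat).map (fun x => |x|)).sum)).sum
     < 9999999999)
instance (G : List (List Int)) (n : Int) : Decidable (Pre_violence G n) := by
  unfold Pre_violence; infer_instance

def pvWitness_violence : List (List Int) × Int := ([[0, 1], [1, 0]], 1)

def Spec_violence (G : List (List Int)) (n : Int) (out : Int × List Int × List Int) : Prop := out = violence_alt G n
instance (G : List (List Int)) (n : Int) (out : Int × List Int × List Int) : Decidable (Spec_violence G n out) := by unfold Spec_violence; infer_instance

-- ===== CLAIM (what is proved, stated in full; the proofs are below) =====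
def Claim_equal_violence : Prop := ∀ (G : List (List Int)) (n : Int), Dom_violence G n → Pre_violence G n → Spec_violence G n (violence G n)

-- ===== LEMMAS AND PROOFS =====
def rsOf (rowsum : List Int) (xs : List Int) : Int :=
  (xs.map (fun u => PySem.List.pyGetD rowsum u 0)).sum

def s2Of (G : List (List Int)) (xs : List Int) : Int :=
  (xs.map (fun u => (xs.map (fun v => gget G u v)).sum)).sum

def stepB (G : List (List Int)) (rowsum : List Int) (b : Int × Option (List Int))
    (xs : List Int) : Int × Option (List Int) :=
  if rsOf rowsum xs - s2Of G xs < b.1 then (rsOf rowsum xs - s2Of G xs, some xs) else b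

theorem combos_flat (m : Int) (k : Nat) (start : Int) :
    PySem.List.combinations (PySem.List.pyRange start m 1) (k + 1)
      = (PySem.List.pyRange start (m - k) 1).flatMap
          (fun w => (PySem.List.combinations (PySem.List.pyRange (w + 1) m 1) k).map (w :: ·)) := by
  by_cases h : m - k ≤ start
  · rw [PySem.List.pyRange_one_eq_nil h]
    rw [PySem.List.combinations_eq_nil_of_length_lt]
    · simp
    · rw [PySem.List.length_pyRange_one]; omega
  · push Not at h
    rw [PySem.List.pyRange_one_cons (show start < m by omega),
        PySem.List.combinations_cons_succ,
        PySem.List.pyRange_one_cons (show start < m - k by omega),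
        List.flatMap_cons]
    congr 1
    exact combos_flat m k (start + 1)
termination_by (m - start).toNat
decreasing_by omega

theorem s2Of_append (G : List (List Int)) (xs : List Int) (w : Int) :
    s2Of G (xs ++ [w]) = s2Of G xs +
      ((xs.map (fun v => gget G w v)).sum + (xs.map (fun v => gget G v w)).sum + gget G w w) := by
  unfold s2Of
  simp [List.map_append, List.sum_append]
  ring

theorem dfs_eq (G : List (List Int)) (rowsum : List Int) (m : Int) (k : Nat) :
    ∀ (start : Int) (chosen : List Int) (best : Int × Option (List Int)),
    dfsB G rowsum m k start chosen (rsOf rowsum chosen) (s2Of G chosen) best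
      = (PySem.List.combinations (PySem.List.pyRange start m 1) k).foldl
          (fun b c => stepB G rowsum b (chosen ++ c)) best := by
  induction k with
  | zero =>
    intro start chosen best
    simp [dfsB, PySem.List.combinations_zero, stepB]
  | succ k ih =>
    intro start chosen best
    rw [combos_flat, List.foldl_flatMap]
    show (PySem.List.pyRange start (m - (k + 1 : Nat) + 1) 1).foldl _ best = _
    have harith : m - ((k : Int) + 1) + 1 = m - k := by ring
    rw [show ((k + 1 : Nat) : Int) = (k : Int) + 1 by push_cast; ring, harith]
    apply PySem.List.foldl_congr_mem
    intro b w _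
    have hd : chosen.foldl (fun d v => d + gget G w v + gget G v w) (gget G w w)
        = gget G w w + (chosen.map (fun v => gget G w v + gget G v w)).sum := by
      have hfun : (fun (d : Int) v => d + gget G w v + gget G v w)
          = (fun d v => d + (gget G w v + gget G v w)) := by funext d v; ring
      rw [hfun, PySem.List.foldl_add]
    rw [hd]
    have hrs : rsOf rowsum chosen + PySem.List.pyGetD rowsum w 0 = rsOf rowsum (chosen ++ [w]) := by
      simp [rsOf]
    have hs2 : s2Of G chosen + (gget G w w + (chosen.map (fun v => gget G w v + gget G v w)).sum)
        = s2Of G (chosen ++ [w]) := by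
      rw [s2Of_append, PySem.List.sum_map_add_int]; ring
    rw [hrs]
    simp only [hs2]
    rw [ih (w + 1) (chosen ++ [w]) b]
    rw [List.foldl_map]
    apply PySem.List.foldl_congr_mem
    intro b' c _
    simp [List.append_assoc]

def rowsumOf (G : List (List Int)) (m : Int) : List Int :=
  (PySem.List.pyRange 0 m 1).map (fun u => (PySem.List.pyRange 0 m 1).foldl (fun s v => s + gget G u v) 0)

theorem calc_cost_eq (G : List (List Int)) (X Y : List Int) :
    calc_cost G X Y = (X.map (fun u => (Y.map (fun v => gget G u v)).sum)).sum := by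
  unfold calc_cost
  have hfun : (fun (c : Int) u => Y.foldl (fun c v => c + gget G u v) c)
      = (fun c u => c + (Y.map (fun v => gget G u v)).sum) := by
    funext c u; rw [PySem.List.foldl_add]
  rw [hfun, PySem.List.foldl_add]
  simp

theorem filter_contains_of_sublist : ∀ {l₁ l₂ : List Int}, l₁.Sublist l₂ → l₂.Nodup →
    l₂.filter (fun v => l₁.contains v) = l₁ := by
  intro l₁ l₂ h
  induction h with
  | slnil => intro _; rfl
  | @cons t l₂' y h ih =>
    intro hn
    have hy : t.contains y = false := by
      simp only [List.contains_eq_mem, decide_eq_false_iff_not]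
      intro hmem
      exact (List.nodup_cons.mp hn).1 (h.subset hmem)
    simp only [List.filter_cons, hy]
    exact ih (List.nodup_cons.mp hn).2
  | @cons₂ t l₂' y h ih =>
    intro hn
    have hyn : y ∉ l₂' := (List.nodup_cons.mp hn).1
    simp only [List.filter_cons, List.contains_cons, BEq.rfl, Bool.true_or, if_pos]
    congr 1
    have hcong : List.filter (fun v => v == y || t.contains v) l₂'
        = List.filter (fun v => t.contains v) l₂' := by
      apply List.filter_congr
      intro v hv
      have hne : (v == y) = false := by
        simp only [beq_eq_false_iff_ne]; rintro rfl; exact hyn hv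
      simp [hne]
    rw [hcong]
    exact ih (List.nodup_cons.mp hn).2

theorem sum_split (l : List Int) (p : Int → Bool) (f : Int → Int) :
    (l.map f).sum = ((l.filter p).map f).sum + ((l.filter (fun x => !p x)).map f).sum := by
  have h := (List.filter_append_perm p l).map f
  rw [← h.sum_eq, List.map_append, List.sum_append]

theorem rowsum_get (G : List (List Int)) (m u : Int) (h0 : 0 ≤ u) (h1 : u < m) :
    PySem.List.pyGetD (rowsumOf G m) u 0
      = ((PySem.List.pyRange 0 m 1).map (fun v => gget G u v)).sum := by
  unfold rowsumOf
  rw [PySem.List.pyGetD_map_pyRange_of_nonneg _ m u 0 h0 h1, PySem.List.foldl_add]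
  simp

theorem cost_eq (G : List (List Int)) (m : Int) (obj : List Int)
    (hsub : obj.Sublist (PySem.List.pyRange 0 m 1)) :
    calc_cost G (PySem.Set.ofList obj)
        (PySem.Set.diff (PySem.Set.ofList (PySem.List.pyRange 0 m 1)) (PySem.Set.ofList obj))
      = rsOf (rowsumOf G m) obj - s2Of G obj := by
  have hnr : (PySem.List.pyRange 0 m 1).Nodup := PySem.List.nodup_pyRange_one 0 m
  have hno : obj.Nodup := hsub.nodup hnr
  rw [PySem.Set.ofList_eq_self_of_nodup obj hno,
      PySem.Set.ofList_eq_self_of_nodup _ hnr]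
  have hdiff : PySem.Set.diff (PySem.List.pyRange 0 m 1) obj
      = (PySem.List.pyRange 0 m 1).filter (fun v => !obj.contains v) := rfl
  rw [hdiff, calc_cost_eq]
  have hrs : rsOf (rowsumOf G m) obj
      = (obj.map (fun u => ((PySem.List.pyRange 0 m 1).map (fun v => gget G u v)).sum)).sum := by
    unfold rsOf
    apply congrArg List.sum
    apply List.map_congr_left
    intro u hu
    have hb := PySem.List.mem_pyRange_one.mp (hsub.subset hu)
    exact rowsum_get G m u hb.1 hb.2
  have hfc : (PySem.List.pyRange 0 m 1).filter (fun v => obj.contains v) = obj :=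
    filter_contains_of_sublist hsub hnr
  have hkey : (obj.map (fun u => ((PySem.List.pyRange 0 m 1).map (fun v => gget G u v)).sum)).sum
      = (obj.map (fun u => (obj.map (fun v => gget G u v)).sum)).sum
        + (obj.map (fun u =>
            (((PySem.List.pyRange 0 m 1).filter (fun v => !obj.contains v)).map
              (fun v => gget G u v)).sum)).sum := by
    rw [← PySem.List.sum_map_add_int]
    apply congrArg List.sum
    apply List.map_congr_left
    intro u _
    rw [sum_split (PySem.List.pyRange 0 m 1) (fun v => obj.contains v) (fun v => gget G u v), hfc]
  rw [hrs, hkey]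
  unfold s2Of
  ring

def liftF (rng : List Int) (s : Int × Option (List Int)) :
    Int × Option (List Int) × Option (List Int) :=
  (s.1, s.2.map PySem.Set.ofList,
   s.2.map (fun xs => PySem.Set.diff (PySem.Set.ofList rng) (PySem.Set.ofList xs)))

theorem fold_lift (G : List (List Int)) (rng rowsum : List Int) (l : List (List Int))
    (hc : ∀ obj ∈ l, calc_cost G (PySem.Set.ofList obj)
        (PySem.Set.diff (PySem.Set.ofList rng) (PySem.Set.ofList obj))
        = rsOf rowsum obj - s2Of G obj) :
    ∀ s, l.foldl (fun st obj =>
        let X := PySem.Set.ofList obj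
        let Y := PySem.Set.diff (PySem.Set.ofList rng) X
        let c := calc_cost G X Y
        if c < st.1 then (c, some X, some Y) else st) (liftF rng s)
      = liftF rng (l.foldl (fun b c => stepB G rowsum b c) s) := by
  induction l with
  | nil => intro s; rfl
  | cons obj t ih =>
    intro s
    simp only [List.foldl_cons]
    rw [hc obj (by simp)]
    have hstep : (if rsOf rowsum obj - s2Of G obj < (liftF rng s).1
        then (rsOf rowsum obj - s2Of G obj, some (PySem.Set.ofList obj),
              some (PySem.Set.diff (PySem.Set.ofList rng) (PySem.Set.ofList obj)))
        else liftF rng s) = liftF rng (stepB G rowsum s obj) := by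
      unfold stepB liftF
      split_ifs <;> simp
    rw [hstep]
    exact ih (fun o ho => hc o (by simp [ho])) (stepB G rowsum s obj)

theorem violence_total' (G : List (List Int)) (n : Int) : violence G n = violence_alt G n := by
  simp only [violence, violence_alt]
  rw [show (PySem.List.pyRange 0 (2*n) 1).map
        (fun u => (PySem.List.pyRange 0 (2*n) 1).foldl (fun s v => s + gget G u v) 0)
      = rowsumOf G (2*n) from rfl]
  have hb : dfsB G (rowsumOf G (2*n)) (2*n) n.toNat 0 [] 0 0 (9999999999, none)
      = (PySem.List.combinations (PySem.List.pyRange 0 (2*n) 1) n.toNat).foldl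
          (fun b c => stepB G (rowsumOf G (2*n)) b c) (9999999999, none) := by
    have h := dfs_eq G (rowsumOf G (2*n)) (2*n) n.toNat 0 [] (9999999999, none)
    simp only [rsOf, s2Of, List.map_nil, List.sum_nil, List.nil_append] at h
    exact h
  rw [hb]
  have ha := fold_lift G (PySem.List.pyRange 0 (2*n) 1) (rowsumOf G (2*n))
      (PySem.List.combinations (PySem.List.pyRange 0 (2*n) 1) n.toNat)
      (fun obj ho => cost_eq G (2*n) obj (PySem.List.sublist_of_mem_combinations ho))
      (9999999999, none)
  rw [show (liftF (PySem.List.pyRange 0 (2*n) 1) (9999999999, none))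
      = ((9999999999 : Int), (none : Option (List Int)), (none : Option (List Int))) from rfl] at ha
  rw [ha]
  set B := (PySem.List.combinations (PySem.List.pyRange 0 (2*n) 1) n.toNat).foldl
      (fun b c => stepB G (rowsumOf G (2*n)) b c) ((9999999999 : Int), (none : Option (List Int))) with hBdef
  rcases hB : B.2 with _ | xs
  · simp [liftF, hB]
  · simp only [liftF, hB, Option.map_some, Option.getD_some]
    have hnr : (PySem.List.pyRange 0 (2*n) 1).Nodup := PySem.List.nodup_pyRange_one 0 (2*n)
    congr 1
    congr 1
    rw [PySem.Set.ofList_eq_self_of_nodup _ hnr]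
    rw [PySem.Set.ofList_eq_self_of_nodup _ (hnr.filter _)]
    rfl

-- ===== VERDICT (by name: the statement is the Claim_ definition above) =====
theorem violence_spec : Claim_equal_violence := by
  intro G n _ _
  unfold Spec_violence
  exact violence_total' G n
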